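-- pv_equiv track=rewrite | github.com/tnpfldyd/TIL | 백준/Silver/1972. 놀라운 문자열/놀라운 문자열.py | is_surprising
-- ===== SOURCE A (Python) =====
-- def is_surprising(s):
--     n = len(s)
--     for d in range(n - 1):
--         seen = set()
--         for i in range(n - d - 1):
--             pair = s[i] + s[i + d + 1]
--             if pair in seen:
--                 return False
--             seen.add(pair)
--     return True
-- ===== SOURCE B (Python) =====
-- def is_surprising(s):
--     for d in range(1, len(s)):
--         pairs = sorted(a + b for a, b in zip(s, s[d:]))
--         if any(x == y for x, y in zip(pairs, pairs[1:])):
--             return False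
--     return True
-- ===== Notes on version B (the rewrite author's own statement) =====
-- stated objective: alternative
-- what changed: per-gap duplicate detection replaced: instead of scanning indices while maintaining a growing seen-set with early exit, B builds each gap's pair list from zip(s, s[d:]), sorts it, and does a linear adjacent-equality scan over the sorted list
import Mathlib
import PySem

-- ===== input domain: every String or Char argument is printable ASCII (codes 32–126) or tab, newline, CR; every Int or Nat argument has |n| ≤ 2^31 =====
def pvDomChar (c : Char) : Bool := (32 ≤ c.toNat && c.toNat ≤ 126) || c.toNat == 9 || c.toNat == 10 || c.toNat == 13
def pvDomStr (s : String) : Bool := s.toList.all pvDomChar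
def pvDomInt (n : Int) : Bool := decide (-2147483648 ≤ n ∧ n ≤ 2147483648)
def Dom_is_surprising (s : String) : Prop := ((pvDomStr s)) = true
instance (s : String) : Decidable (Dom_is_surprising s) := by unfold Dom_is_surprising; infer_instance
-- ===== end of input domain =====

-- B replaces A's per-gap seen-set membership loop by sort-then-adjacent-scan duplicate
-- detection on the zipped pair list; objective: alternative (same task, different algorithm).

-- ===== PORT A =====
-- inner loop 'for i in range(n-d-1): pair = s[i]+s[i+d+1]; if pair in seen: return False; seen.add(pair)'
-- (the loop's indices i and i+d+1 are always in range, so pyGetD's default is never used)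
def isSurpInner (cs : List Char) (d : Int) : List Int → PySem.Set String → Bool
  | [], _ => true
  | i :: is, seen =>
    let pair : String := String.ofList [PySem.List.pyGetD cs i ' ', PySem.List.pyGetD cs (i + d + 1) ' ']
    if PySem.Set.contains seen pair then false
    else isSurpInner cs d is (PySem.Set.add seen pair)

-- outer loop 'for d in range(n-1): seen = set(); …' with early return False
def isSurpOuter (cs : List Char) (n : Int) : List Int → Bool
  | [] => true
  | d :: ds =>
    if isSurpInner cs d (PySem.List.pyRange 0 (n - d - 1) 1) PySem.Set.empty
    then isSurpOuter cs n ds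
    else false

def is_surprising (s : String) : Bool :=
  let cs := s.toList
  let n : Int := cs.length
  isSurpOuter cs n (PySem.List.pyRange 0 (n - 1) 1)

-- ===== PORT B =====
-- 'for d in range(1, len(s)): pairs = sorted(a+b for a,b in zip(s, s[d:]));
--    if any(x == y for x, y in zip(pairs, pairs[1:])): return False'
def altLoop (cs : List Char) : List Int → Bool
  | [] => true
  | d :: ds =>
    let pairs : List String :=
      PySem.List.sorted ((cs.zip (PySem.List.slice cs (some d) none)).map
        (fun p => String.ofList [p.1, p.2])) (fun x => x) false
    if (pairs.zip (PySem.List.slice pairs (some 1) none)).any (fun p => p.1 == p.2)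
    then false
    else altLoop cs ds

def is_surprising_alt (s : String) : Bool :=
  let cs := s.toList
  altLoop cs (PySem.List.pyRange 1 cs.length 1)

-- ===== PRECONDITION & SPEC =====
def Spec_is_surprising (s : String) (out : Bool) : Prop := out = is_surprising_alt s
instance (s : String) (out : Bool) : Decidable (Spec_is_surprising s out) := by unfold Spec_is_surprising; infer_instance

-- ===== CLAIM (what is proved, stated in full; the proofs are below) =====
def Claim_equal_is_surprising : Prop := ∀ (s : String), Dom_is_surprising s → Spec_is_surprising s (is_surprising s)

-- ===== LEMMAS AND PROOFS =====

-- the pair list of gap g, the common yardstick for both ports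
def canonPairs (cs : List Char) (g : Nat) : List String :=
  (cs.zip (cs.drop g)).map (fun p => String.ofList [p.1, p.2])

-- A's index loop produces exactly the gap-(d+1) pair list
theorem A_pairs (cs : List Char) (d : Int) (hd : 0 ≤ d) :
    (PySem.List.pyRange 0 ((cs.length : Int) - d - 1) 1).map
      (fun i => String.ofList [PySem.List.pyGetD cs i ' ', PySem.List.pyGetD cs (i + d + 1) ' '])
      = canonPairs cs (d.toNat + 1) := by
  set g : Nat := d.toNat + 1 with hg
  rw [PySem.List.pyRange_one]
  have hm : ((cs.length : Int) - d - 1 - 0).toNat = cs.length - g := by omega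
  rw [hm, List.map_map, canonPairs]
  apply List.ext_getElem
  · simp [List.length_zip]
  · intro k h1 h2
    simp only [List.length_map, List.length_range] at h1
    have hk : k < cs.length - g := h1
    have hkg : g + k < cs.length := by omega
    have hkl : k < cs.length := by omega
    simp only [List.getElem_map, List.getElem_range, Function.comp_apply, List.getElem_zip,
      List.getElem_drop]
    have e1 : PySem.List.pyGetD cs ((0 : Int) + k) ' ' = cs[k] := by
      rw [show ((0:Int) + k) = ((k : Nat) : Int) by omega, PySem.List.pyGetD_natCast]
      simp [List.getD_eq_getElem?_getD, hkl]
    have e2 : PySem.List.pyGetD cs ((0 : Int) + k + d + 1) ' ' = cs[g + k] := by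
      rw [show ((0:Int) + k + d + 1) = (((g + k : Nat)) : Int) by omega, PySem.List.pyGetD_natCast]
      simp [List.getD_eq_getElem?_getD, hkg]
    rw [e1, e2]

-- A's seen-set scan, abstracted to the list of values it scans
def dupScan : List String → PySem.Set String → Bool
  | [], _ => true
  | x :: t, seen =>
    if PySem.Set.contains seen x then false else dupScan t (PySem.Set.add seen x)

theorem inner_eq_dupScan (cs : List Char) (d : Int) : ∀ (idxs : List Int) (seen : PySem.Set String),
    isSurpInner cs d idxs seen
      = dupScan (idxs.map (fun i =>
          String.ofList [PySem.List.pyGetD cs i ' ', PySem.List.pyGetD cs (i + d + 1) ' '])) seen := by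
  intro idxs
  induction idxs with
  | nil => intro seen; rfl
  | cons i is ih =>
    intro seen
    simp only [isSurpInner, List.map_cons, dupScan]
    split <;> simp [ih]

theorem dupScan_true_iff (l : List String) : ∀ (seen : PySem.Set String),
    dupScan l seen = true ↔ l.Nodup ∧ ∀ x ∈ l, x ∉ seen := by
  induction l with
  | nil => simp [dupScan]
  | cons a t ih =>
    intro seen
    rw [show dupScan (a :: t) seen
        = if PySem.Set.contains seen a then false else dupScan t (PySem.Set.add seen a) from rfl]
    by_cases h : a ∈ seen
    · rw [if_pos ((PySem.Set.contains_iff _ _).mpr h)]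
      simp only [List.mem_cons]
      constructor
      · intro hf; exact absurd hf (by simp)
      · rintro ⟨-, hm⟩; exact absurd h (hm a (Or.inl rfl))
    · rw [if_neg (by rw [PySem.Set.contains_iff]; exact h), ih]
      simp only [List.nodup_cons, List.mem_cons, PySem.Set.mem_add]
      constructor
      · rintro ⟨hn, hm⟩
        have hat : a ∉ t := fun hat => by have := hm a hat; tauto
        refine ⟨⟨hat, hn⟩, ?_⟩
        rintro x (rfl | hx)
        · exact h
        · exact fun hs => (hm x hx) (Or.inl hs)
      · rintro ⟨⟨hat, hn⟩, hm⟩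
        refine ⟨hn, fun x hx => ?_⟩
        have hxs := hm x (Or.inr hx)
        rintro (h1 | h1)
        · exact hxs h1
        · exact hat (h1 ▸ hx)

-- adjacent-equality scan on a ≤-sorted list detects exactly the duplicates
theorem sorted_adj_iff (l : List String) (hp : l.Pairwise (· ≤ ·)) :
    ((l.zip l.tail).any (fun p => p.1 == p.2) = false) ↔ l.Nodup := by
  induction l with
  | nil => simp
  | cons a t ih =>
    cases t with
    | nil => simp
    | cons b t =>
      simp only [List.tail_cons, List.zip_cons_cons, List.any_cons, Bool.or_eq_false_iff,
        beq_eq_false_iff_ne, ne_eq]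
      have hpt : (b :: t).Pairwise (· ≤ ·) := hp.tail
      have hab : a ≤ b := (List.pairwise_cons.mp hp).1 b (by simp)
      constructor
      · rintro ⟨hne, hrest⟩
        have hnd : (b :: t).Nodup := (ih hpt).mp hrest
        refine List.nodup_cons.mpr ⟨?_, hnd⟩
        intro hmem
        rcases List.mem_cons.mp hmem with rfl | hat
        · exact hne rfl
        · have hba : b ≤ a := (List.pairwise_cons.mp hpt).1 a hat
          exact hne (le_antisymm hab hba)
      · intro hnd
        refine ⟨fun h => ?_, (ih hpt).mpr hnd.tail⟩
        subst h
        simp at hnd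

-- A, per gap: the inner scan succeeds iff the gap-(d+1) pair list has no duplicate
theorem inner_nodup (cs : List Char) (d : Int) (hd : 0 ≤ d) :
    (isSurpInner cs d (PySem.List.pyRange 0 ((cs.length : Int) - d - 1) 1) PySem.Set.empty = true)
      ↔ (canonPairs cs (d.toNat + 1)).Nodup := by
  rw [inner_eq_dupScan, A_pairs cs d hd, dupScan_true_iff]
  simp [PySem.Set.empty]

-- B, per gap: the sorted adjacent scan finds nothing iff the gap-d pair list has no duplicate
def gapAny (cs : List Char) (d : Int) : Bool :=
  let pairs : List String :=
    PySem.List.sorted ((cs.zip (PySem.List.slice cs (some d) none)).map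
      (fun p => String.ofList [p.1, p.2])) (fun x => x) false
  (pairs.zip (PySem.List.slice pairs (some 1) none)).any (fun p => p.1 == p.2)

theorem altLoop_cons (cs : List Char) (d : Int) (ds : List Int) :
    altLoop cs (d :: ds) = if gapAny cs d then false else altLoop cs ds := rfl

theorem gapAny_eq_false_iff (cs : List Char) (d : Int) (hd : 1 ≤ d) :
    gapAny cs d = false ↔ (canonPairs cs d.toNat).Nodup := by
  have hslice : PySem.List.slice cs (some d) none = cs.drop d.toNat :=
    PySem.List.slice_from cs (by omega)
  unfold gapAny
  simp only [hslice]
  rw [show ((cs.zip (cs.drop d.toNat)).map (fun p => String.ofList [p.1, p.2]))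
      = canonPairs cs d.toNat from rfl]
  rw [PySem.List.slice_from_one,
      sorted_adj_iff _ (PySem.List.sorted_pairwise (canonPairs cs d.toNat) (fun x => x)),
      List.Perm.nodup_iff (PySem.List.sorted_perm (canonPairs cs d.toNat) (fun x => x) false)]

theorem outer_iff (cs : List Char) : ∀ (ds : List Int), (∀ d ∈ ds, 0 ≤ d) →
    (isSurpOuter cs (cs.length : Int) ds = true ↔ ∀ d ∈ ds, (canonPairs cs (d.toNat + 1)).Nodup) := by
  intro ds
  induction ds with
  | nil => simp [isSurpOuter]
  | cons d ds ih =>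
    intro hb
    have hd : 0 ≤ d := hb d (by simp)
    simp only [isSurpOuter]
    by_cases h : isSurpInner cs d (PySem.List.pyRange 0 ((cs.length : Int) - d - 1) 1) PySem.Set.empty = true
    · rw [if_pos h, ih (fun x hx => hb x (List.mem_cons_of_mem _ hx))]
      have hc := (inner_nodup cs d hd).mp h
      simp [hc]
    · rw [if_neg h]
      have : ¬ (canonPairs cs (d.toNat + 1)).Nodup := fun hc => h ((inner_nodup cs d hd).mpr hc)
      simp only [List.mem_cons]
      constructor
      · intro hf; exact absurd hf (by simp)
      · intro hall; exact absurd (hall d (Or.inl rfl)) this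

theorem altLoop_iff (cs : List Char) : ∀ (ds : List Int), (∀ d ∈ ds, 1 ≤ d) →
    (altLoop cs ds = true ↔ ∀ d ∈ ds, (canonPairs cs d.toNat).Nodup) := by
  intro ds
  induction ds with
  | nil => simp [altLoop]
  | cons d ds ih =>
    intro hb
    have hd : 1 ≤ d := hb d (by simp)
    rw [altLoop_cons]
    cases hg : gapAny cs d with
    | false =>
      rw [if_neg (by simp), ih (fun x hx => hb x (List.mem_cons_of_mem _ hx))]
      have hc := (gapAny_eq_false_iff cs d hd).mp hg
      simp [hc]
    | true =>
      rw [if_pos rfl]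
      have : ¬ (canonPairs cs d.toNat).Nodup := fun hc => by
        rw [(gapAny_eq_false_iff cs d hd).mpr hc] at hg; cases hg
      simp only [List.mem_cons]
      constructor
      · intro hf; exact absurd hf (by simp)
      · intro hall; exact absurd (hall d (Or.inl rfl)) this

-- ===== VERDICT (by name: the statement is the Claim_ definition above) =====
theorem is_surprising_spec : Claim_equal_is_surprising := by
  intro s _
  unfold Spec_is_surprising is_surprising is_surprising_alt
  rw [Bool.eq_iff_iff]
  rw [outer_iff s.toList _ (fun d hd => ((PySem.List.mem_pyRange_one).mp hd).1),
      altLoop_iff s.toList _ (fun d hd => ((PySem.List.mem_pyRange_one).mp hd).1)]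
  constructor
  · intro hA d hd
    have hb := (PySem.List.mem_pyRange_one).mp hd
    have := hA (d - 1) ((PySem.List.mem_pyRange_one).mpr (by omega))
    have he : (d - 1).toNat + 1 = d.toNat := by omega
    rwa [he] at this
  · intro hB d hd
    have hb := (PySem.List.mem_pyRange_one).mp hd
    have := hB (d + 1) ((PySem.List.mem_pyRange_one).mpr (by omega))
    have he : (d + 1).toNat = d.toNat + 1 := by omega
    rwa [he] at this
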